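-- pv_equiv track=rewrite | github.com/alextgu/Brooklyn99-Quote-Guesser | core/quotes.py | get_speaker_aliases
-- ===== SOURCE A (Python) =====
-- CHARACTER_ALIASES = {
--     # Main cast
--     "Jake": ["Jake", "Peralta", "Jake Peralta"],
--     "Amy": ["Amy", "Santiago", "Amy Santiago"],
--     "Rosa": ["Rosa", "Diaz", "Rosa Diaz"],
--     "Charles": ["Charles", "Boyle", "Charles Boyle"],
--     "Sergeant Jeffords": ["Terry", "Jeffords", "Terry Jeffords", "Sergeant Jeffords", "Sarge"],
--     "Gina": ["Gina", "Linetti", "Gina Linetti"],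
--     "Captain Holt": ["Holt", "Captain Holt", "Raymond", "Raymond Holt", "Captain Raymond Holt"],
--     "Kevin": ["Kevin", "Cozner", "Kevin Cozner"],
--     "Hitchcock": ["Hitchcock", "Michael Hitchcock"],
--     "Scully": ["Scully", "Norm Scully"],
--
--     # Recurring characters
--     "Doug Judy": ["Doug Judy", "Judy", "Doug", "The Pontiac Bandit", "Pontiac Bandit"],
--     "Trudy Judy": ["Trudy Judy", "Trudy"],
--     "Madeline Wuntch": ["Wuntch", "Madeline", "Madeline Wuntch", "Deputy Chief Wuntch"],
--     "Adrian Pimento": ["Adrian", "Pimento", "Adrian Pimento"],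
--     "The Vulture": ["The Vulture", "Vulture", "Pembroke", "Keith Pembroke"],
--     "Captain C.J. Jason Stentley": ["CJ", "Captain CJ", "Captain C.J. Jason Stentley", "Stentley"],
--     "Officer Debbie Fogle": ["Debbie", "Fogle", "Foggle", "Debbie Fogle", "Debbie Foggle", "Officer Fogle", "Officer Debbie Fogle"],
--     "Teddy": ["Teddy", "Teddy Wells"],
--     "Sophia": ["Sophia", "Sophia Perez"],
--     "Genevieve": ["Genevieve"],
--     "Nikolaj Boyle": ["Nikolaj", "Nikolaj Boyle"],
--     "Dillman": ["Dillman"],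
--
--     # Family members
--     "Karen Peralta": ["Karen", "Karen Peralta"],
--     "Roger Peralta": ["Roger", "Roger Peralta"],
--     "Walter Peralta": ["Walter", "Walter Peralta"],
--     "Katie Peralta": ["Katie", "Katie Peralta"],
--     "Victor Santiago": ["Victor", "Victor Santiago"],
--     "Camila Santiago": ["Camila", "Camila Santiago"],
--     "David Santiago": ["David", "David Santiago"],
--     "Darlene Linetti": ["Darlene", "Darlene Linetti"],
--     "Lynn Boyle": ["Lynn", "Lynn Boyle"],
--
--     # Minor/guest characters
--     "Adam Jarver": ["Adam", "Jarver", "Adam Jarver"],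
--     "Beefer": ["Beefer"],
--     "Bill": ["Bill"],
--     "Cindy Shatz": ["Cindy", "Shatz", "Cindy Shatz"],
--     "Detective Lohank": ["Lohank", "Detective Lohank"],
--     "Emily": ["Emily"],
--     "Gintars": ["Gintars"],
--     "Gordon Lundt": ["Gordon", "Lundt", "Gordon Lundt"],
--     "Jess": ["Jess"],
--     "Keri Brennan": ["Keri", "Brennan", "Keri Brennan"],
--     "Milton": ["Milton"],
--     "Pam": ["Pam"],
--     "Sheriff Reynolds": ["Reynolds", "Sheriff Reynolds"],
-- }
--
-- def get_speaker_aliases(character: str) -> set[str]: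
--     """Get all name variations for a character."""
--     aliases = set()
--     char_lower = character.lower().strip()
--
--     # Check each alias group
--     for main_name, name_list in CHARACTER_ALIASES.items():
--         name_list_lower = [n.lower() for n in name_list]
--         if char_lower in name_list_lower or char_lower == main_name.lower():
--             aliases.update(n.lower() for n in name_list)
--             break
--
--     # Fallback: use the character name and its parts
--     if not aliases:
--         aliases.add(char_lower)
--         for part in character.split():
--             if len(part) > 2:
--                 aliases.add(part.lower())
--
--     return aliases
-- ===== SOURCE B (Python) =====
-- # Precomputed reverse lookup table: each lowered alias/main name maps directly to
-- # its group's lowered alias tuple (first group wins for any shared key), so a call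
-- # is one dict lookup instead of scanning and re-lowercasing every alias group.
-- _ALIAS_INDEX = {
--     'jake': ('jake', 'peralta', 'jake peralta'),
--     'peralta': ('jake', 'peralta', 'jake peralta'),
--     'jake peralta': ('jake', 'peralta', 'jake peralta'),
--     'amy': ('amy', 'santiago', 'amy santiago'),
--     'santiago': ('amy', 'santiago', 'amy santiago'),
--     'amy santiago': ('amy', 'santiago', 'amy santiago'),
--     'rosa': ('rosa', 'diaz', 'rosa diaz'),
--     'diaz': ('rosa', 'diaz', 'rosa diaz'),
--     'rosa diaz': ('rosa', 'diaz', 'rosa diaz'),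
--     'charles': ('charles', 'boyle', 'charles boyle'),
--     'boyle': ('charles', 'boyle', 'charles boyle'),
--     'charles boyle': ('charles', 'boyle', 'charles boyle'),
--     'terry': ('terry', 'jeffords', 'terry jeffords', 'sergeant jeffords', 'sarge'),
--     'jeffords': ('terry', 'jeffords', 'terry jeffords', 'sergeant jeffords', 'sarge'),
--     'terry jeffords': ('terry', 'jeffords', 'terry jeffords', 'sergeant jeffords', 'sarge'),
--     'sergeant jeffords': ('terry', 'jeffords', 'terry jeffords', 'sergeant jeffords', 'sarge'),
--     'sarge': ('terry', 'jeffords', 'terry jeffords', 'sergeant jeffords', 'sarge'),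
--     'gina': ('gina', 'linetti', 'gina linetti'),
--     'linetti': ('gina', 'linetti', 'gina linetti'),
--     'gina linetti': ('gina', 'linetti', 'gina linetti'),
--     'holt': ('holt', 'captain holt', 'raymond', 'raymond holt', 'captain raymond holt'),
--     'captain holt': ('holt', 'captain holt', 'raymond', 'raymond holt', 'captain raymond holt'),
--     'raymond': ('holt', 'captain holt', 'raymond', 'raymond holt', 'captain raymond holt'),
--     'raymond holt': ('holt', 'captain holt', 'raymond', 'raymond holt', 'captain raymond holt'),
--     'captain raymond holt': ('holt', 'captain holt', 'raymond', 'raymond holt', 'captain raymond holt'),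
--     'kevin': ('kevin', 'cozner', 'kevin cozner'),
--     'cozner': ('kevin', 'cozner', 'kevin cozner'),
--     'kevin cozner': ('kevin', 'cozner', 'kevin cozner'),
--     'hitchcock': ('hitchcock', 'michael hitchcock'),
--     'michael hitchcock': ('hitchcock', 'michael hitchcock'),
--     'scully': ('scully', 'norm scully'),
--     'norm scully': ('scully', 'norm scully'),
--     'doug judy': ('doug judy', 'judy', 'doug', 'the pontiac bandit', 'pontiac bandit'),
--     'judy': ('doug judy', 'judy', 'doug', 'the pontiac bandit', 'pontiac bandit'),
--     'doug': ('doug judy', 'judy', 'doug', 'the pontiac bandit', 'pontiac bandit'),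
--     'the pontiac bandit': ('doug judy', 'judy', 'doug', 'the pontiac bandit', 'pontiac bandit'),
--     'pontiac bandit': ('doug judy', 'judy', 'doug', 'the pontiac bandit', 'pontiac bandit'),
--     'trudy judy': ('trudy judy', 'trudy'),
--     'trudy': ('trudy judy', 'trudy'),
--     'wuntch': ('wuntch', 'madeline', 'madeline wuntch', 'deputy chief wuntch'),
--     'madeline': ('wuntch', 'madeline', 'madeline wuntch', 'deputy chief wuntch'),
--     'madeline wuntch': ('wuntch', 'madeline', 'madeline wuntch', 'deputy chief wuntch'),
--     'deputy chief wuntch': ('wuntch', 'madeline', 'madeline wuntch', 'deputy chief wuntch'),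
--     'adrian': ('adrian', 'pimento', 'adrian pimento'),
--     'pimento': ('adrian', 'pimento', 'adrian pimento'),
--     'adrian pimento': ('adrian', 'pimento', 'adrian pimento'),
--     'the vulture': ('the vulture', 'vulture', 'pembroke', 'keith pembroke'),
--     'vulture': ('the vulture', 'vulture', 'pembroke', 'keith pembroke'),
--     'pembroke': ('the vulture', 'vulture', 'pembroke', 'keith pembroke'),
--     'keith pembroke': ('the vulture', 'vulture', 'pembroke', 'keith pembroke'),
--     'cj': ('cj', 'captain cj', 'captain c.j. jason stentley', 'stentley'),
--     'captain cj': ('cj', 'captain cj', 'captain c.j. jason stentley', 'stentley'),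
--     'captain c.j. jason stentley': ('cj', 'captain cj', 'captain c.j. jason stentley', 'stentley'),
--     'stentley': ('cj', 'captain cj', 'captain c.j. jason stentley', 'stentley'),
--     'debbie': ('debbie', 'fogle', 'foggle', 'debbie fogle', 'debbie foggle', 'officer fogle', 'officer debbie fogle'),
--     'fogle': ('debbie', 'fogle', 'foggle', 'debbie fogle', 'debbie foggle', 'officer fogle', 'officer debbie fogle'),
--     'foggle': ('debbie', 'fogle', 'foggle', 'debbie fogle', 'debbie foggle', 'officer fogle', 'officer debbie fogle'),
--     'debbie fogle': ('debbie', 'fogle', 'foggle', 'debbie fogle', 'debbie foggle', 'officer fogle', 'officer debbie fogle'),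
--     'debbie foggle': ('debbie', 'fogle', 'foggle', 'debbie fogle', 'debbie foggle', 'officer fogle', 'officer debbie fogle'),
--     'officer fogle': ('debbie', 'fogle', 'foggle', 'debbie fogle', 'debbie foggle', 'officer fogle', 'officer debbie fogle'),
--     'officer debbie fogle': ('debbie', 'fogle', 'foggle', 'debbie fogle', 'debbie foggle', 'officer fogle', 'officer debbie fogle'),
--     'teddy': ('teddy', 'teddy wells'),
--     'teddy wells': ('teddy', 'teddy wells'),
--     'sophia': ('sophia', 'sophia perez'),
--     'sophia perez': ('sophia', 'sophia perez'),
--     'genevieve': ('genevieve',),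
--     'nikolaj': ('nikolaj', 'nikolaj boyle'),
--     'nikolaj boyle': ('nikolaj', 'nikolaj boyle'),
--     'dillman': ('dillman',),
--     'karen': ('karen', 'karen peralta'),
--     'karen peralta': ('karen', 'karen peralta'),
--     'roger': ('roger', 'roger peralta'),
--     'roger peralta': ('roger', 'roger peralta'),
--     'walter': ('walter', 'walter peralta'),
--     'walter peralta': ('walter', 'walter peralta'),
--     'katie': ('katie', 'katie peralta'),
--     'katie peralta': ('katie', 'katie peralta'),
--     'victor': ('victor', 'victor santiago'),
--     'victor santiago': ('victor', 'victor santiago'),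
--     'camila': ('camila', 'camila santiago'),
--     'camila santiago': ('camila', 'camila santiago'),
--     'david': ('david', 'david santiago'),
--     'david santiago': ('david', 'david santiago'),
--     'darlene': ('darlene', 'darlene linetti'),
--     'darlene linetti': ('darlene', 'darlene linetti'),
--     'lynn': ('lynn', 'lynn boyle'),
--     'lynn boyle': ('lynn', 'lynn boyle'),
--     'adam': ('adam', 'jarver', 'adam jarver'),
--     'jarver': ('adam', 'jarver', 'adam jarver'),
--     'adam jarver': ('adam', 'jarver', 'adam jarver'),
--     'beefer': ('beefer',),
--     'bill': ('bill',),
--     'cindy': ('cindy', 'shatz', 'cindy shatz'),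
--     'shatz': ('cindy', 'shatz', 'cindy shatz'),
--     'cindy shatz': ('cindy', 'shatz', 'cindy shatz'),
--     'lohank': ('lohank', 'detective lohank'),
--     'detective lohank': ('lohank', 'detective lohank'),
--     'emily': ('emily',),
--     'gintars': ('gintars',),
--     'gordon': ('gordon', 'lundt', 'gordon lundt'),
--     'lundt': ('gordon', 'lundt', 'gordon lundt'),
--     'gordon lundt': ('gordon', 'lundt', 'gordon lundt'),
--     'jess': ('jess',),
--     'keri': ('keri', 'brennan', 'keri brennan'),
--     'brennan': ('keri', 'brennan', 'keri brennan'),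
--     'keri brennan': ('keri', 'brennan', 'keri brennan'),
--     'milton': ('milton',),
--     'pam': ('pam',),
--     'reynolds': ('reynolds', 'sheriff reynolds'),
--     'sheriff reynolds': ('reynolds', 'sheriff reynolds'),
-- }
--
--
-- def get_speaker_aliases(character: str) -> set[str]:
--     """Get all name variations for a character."""
--     char_lower = character.lower().strip()
--     found = _ALIAS_INDEX.get(char_lower)
--     if found is not None:
--         return set(found)
--     aliases = {char_lower}
--     for part in character.split():
--         if len(part) > 2:
--             aliases.add(part.lower())
--     return aliases
-- ===== Notes on version B (the rewrite author's own statement) =====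
-- stated objective: faster
-- what changed: Replaced the per-call linear scan that re-lowercases every alias group with a hardcoded precomputed reverse lookup table mapping each lowered alias and main name to its group's lowered alias set (first group wins for shared keys), so a call is a single dict lookup; the no-match fallback is unchanged.
import Mathlib
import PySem

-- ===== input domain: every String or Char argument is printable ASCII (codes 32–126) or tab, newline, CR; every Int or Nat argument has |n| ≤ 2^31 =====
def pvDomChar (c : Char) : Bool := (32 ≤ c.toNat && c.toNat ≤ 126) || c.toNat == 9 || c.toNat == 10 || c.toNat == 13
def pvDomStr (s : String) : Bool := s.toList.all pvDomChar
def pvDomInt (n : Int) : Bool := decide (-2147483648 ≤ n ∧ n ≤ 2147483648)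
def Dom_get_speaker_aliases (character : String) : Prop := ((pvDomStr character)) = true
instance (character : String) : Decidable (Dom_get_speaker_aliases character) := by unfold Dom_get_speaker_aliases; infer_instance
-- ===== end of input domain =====

-- B replaces A's per-call scan over CHARACTER_ALIASES with a hardcoded precomputed
-- reverse lookup table (lowered alias -> its group's lowered alias set), one lookup per call.

-- ===== PORT A =====
-- module-level CHARACTER_ALIASES dict, in insertion order
def characterAliases : List (String × List String) := [
  ("Jake", ["Jake", "Peralta", "Jake Peralta"]),
  ("Amy", ["Amy", "Santiago", "Amy Santiago"]),
  ("Rosa", ["Rosa", "Diaz", "Rosa Diaz"]),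
  ("Charles", ["Charles", "Boyle", "Charles Boyle"]),
  ("Sergeant Jeffords", ["Terry", "Jeffords", "Terry Jeffords", "Sergeant Jeffords", "Sarge"]),
  ("Gina", ["Gina", "Linetti", "Gina Linetti"]),
  ("Captain Holt", ["Holt", "Captain Holt", "Raymond", "Raymond Holt", "Captain Raymond Holt"]),
  ("Kevin", ["Kevin", "Cozner", "Kevin Cozner"]),
  ("Hitchcock", ["Hitchcock", "Michael Hitchcock"]),
  ("Scully", ["Scully", "Norm Scully"]),
  ("Doug Judy", ["Doug Judy", "Judy", "Doug", "The Pontiac Bandit", "Pontiac Bandit"]),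
  ("Trudy Judy", ["Trudy Judy", "Trudy"]),
  ("Madeline Wuntch", ["Wuntch", "Madeline", "Madeline Wuntch", "Deputy Chief Wuntch"]),
  ("Adrian Pimento", ["Adrian", "Pimento", "Adrian Pimento"]),
  ("The Vulture", ["The Vulture", "Vulture", "Pembroke", "Keith Pembroke"]),
  ("Captain C.J. Jason Stentley", ["CJ", "Captain CJ", "Captain C.J. Jason Stentley", "Stentley"]),
  ("Officer Debbie Fogle", ["Debbie", "Fogle", "Foggle", "Debbie Fogle", "Debbie Foggle", "Officer Fogle", "Officer Debbie Fogle"]),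
  ("Teddy", ["Teddy", "Teddy Wells"]),
  ("Sophia", ["Sophia", "Sophia Perez"]),
  ("Genevieve", ["Genevieve"]),
  ("Nikolaj Boyle", ["Nikolaj", "Nikolaj Boyle"]),
  ("Dillman", ["Dillman"]),
  ("Karen Peralta", ["Karen", "Karen Peralta"]),
  ("Roger Peralta", ["Roger", "Roger Peralta"]),
  ("Walter Peralta", ["Walter", "Walter Peralta"]),
  ("Katie Peralta", ["Katie", "Katie Peralta"]),
  ("Victor Santiago", ["Victor", "Victor Santiago"]),
  ("Camila Santiago", ["Camila", "Camila Santiago"]),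
  ("David Santiago", ["David", "David Santiago"]),
  ("Darlene Linetti", ["Darlene", "Darlene Linetti"]),
  ("Lynn Boyle", ["Lynn", "Lynn Boyle"]),
  ("Adam Jarver", ["Adam", "Jarver", "Adam Jarver"]),
  ("Beefer", ["Beefer"]),
  ("Bill", ["Bill"]),
  ("Cindy Shatz", ["Cindy", "Shatz", "Cindy Shatz"]),
  ("Detective Lohank", ["Lohank", "Detective Lohank"]),
  ("Emily", ["Emily"]),
  ("Gintars", ["Gintars"]),
  ("Gordon Lundt", ["Gordon", "Lundt", "Gordon Lundt"]),
  ("Jess", ["Jess"]),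
  ("Keri Brennan", ["Keri", "Brennan", "Keri Brennan"]),
  ("Milton", ["Milton"]),
  ("Pam", ["Pam"]),
  ("Sheriff Reynolds", ["Reynolds", "Sheriff Reynolds"])]

-- A's for-loop with break: recursion over the alias groups; 'aliases' stays empty
-- until the first matching group updates it and the loop breaks.
def aScanA (char_lower : String) : List (String × List String) → PySem.Set String
  | [] => PySem.Set.empty
  | (main_name, name_list) :: rest =>
      let name_list_lower := name_list.map PySem.Str.lower
      if name_list_lower.contains char_lower || char_lower == PySem.Str.lower main_name then
        PySem.Set.update PySem.Set.empty (name_list.map PySem.Str.lower)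
      else aScanA char_lower rest

def get_speaker_aliases (character : String) : List String :=
  let char_lower := PySem.Str.strip (PySem.Str.lower character)
  let aliases := aScanA char_lower characterAliases
  if aliases.isEmpty then
    let aliases := PySem.Set.add PySem.Set.empty char_lower
    (PySem.Str.split₀ character).foldl
      (fun s part => if PySem.Str.len part > 2 then PySem.Set.add s (PySem.Str.lower part) else s)
      aliases
  else aliases

-- ===== PORT B =====
-- hardcoded precomputed reverse table, as in Source B (dict literal in insertion order)
def aliasIndex : PySem.Dict String (PySem.Set String) := PySem.Dict.mk [
  ("jake", ["jake", "peralta", "jake peralta"]),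
  ("peralta", ["jake", "peralta", "jake peralta"]),
  ("jake peralta", ["jake", "peralta", "jake peralta"]),
  ("amy", ["amy", "santiago", "amy santiago"]),
  ("santiago", ["amy", "santiago", "amy santiago"]),
  ("amy santiago", ["amy", "santiago", "amy santiago"]),
  ("rosa", ["rosa", "diaz", "rosa diaz"]),
  ("diaz", ["rosa", "diaz", "rosa diaz"]),
  ("rosa diaz", ["rosa", "diaz", "rosa diaz"]),
  ("charles", ["charles", "boyle", "charles boyle"]),
  ("boyle", ["charles", "boyle", "charles boyle"]),
  ("charles boyle", ["charles", "boyle", "charles boyle"]),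
  ("terry", ["terry", "jeffords", "terry jeffords", "sergeant jeffords", "sarge"]),
  ("jeffords", ["terry", "jeffords", "terry jeffords", "sergeant jeffords", "sarge"]),
  ("terry jeffords", ["terry", "jeffords", "terry jeffords", "sergeant jeffords", "sarge"]),
  ("sergeant jeffords", ["terry", "jeffords", "terry jeffords", "sergeant jeffords", "sarge"]),
  ("sarge", ["terry", "jeffords", "terry jeffords", "sergeant jeffords", "sarge"]),
  ("gina", ["gina", "linetti", "gina linetti"]),
  ("linetti", ["gina", "linetti", "gina linetti"]),
  ("gina linetti", ["gina", "linetti", "gina linetti"]),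
  ("holt", ["holt", "captain holt", "raymond", "raymond holt", "captain raymond holt"]),
  ("captain holt", ["holt", "captain holt", "raymond", "raymond holt", "captain raymond holt"]),
  ("raymond", ["holt", "captain holt", "raymond", "raymond holt", "captain raymond holt"]),
  ("raymond holt", ["holt", "captain holt", "raymond", "raymond holt", "captain raymond holt"]),
  ("captain raymond holt", ["holt", "captain holt", "raymond", "raymond holt", "captain raymond holt"]),
  ("kevin", ["kevin", "cozner", "kevin cozner"]),
  ("cozner", ["kevin", "cozner", "kevin cozner"]),
  ("kevin cozner", ["kevin", "cozner", "kevin cozner"]),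
  ("hitchcock", ["hitchcock", "michael hitchcock"]),
  ("michael hitchcock", ["hitchcock", "michael hitchcock"]),
  ("scully", ["scully", "norm scully"]),
  ("norm scully", ["scully", "norm scully"]),
  ("doug judy", ["doug judy", "judy", "doug", "the pontiac bandit", "pontiac bandit"]),
  ("judy", ["doug judy", "judy", "doug", "the pontiac bandit", "pontiac bandit"]),
  ("doug", ["doug judy", "judy", "doug", "the pontiac bandit", "pontiac bandit"]),
  ("the pontiac bandit", ["doug judy", "judy", "doug", "the pontiac bandit", "pontiac bandit"]),
  ("pontiac bandit", ["doug judy", "judy", "doug", "the pontiac bandit", "pontiac bandit"]),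
  ("trudy judy", ["trudy judy", "trudy"]),
  ("trudy", ["trudy judy", "trudy"]),
  ("wuntch", ["wuntch", "madeline", "madeline wuntch", "deputy chief wuntch"]),
  ("madeline", ["wuntch", "madeline", "madeline wuntch", "deputy chief wuntch"]),
  ("madeline wuntch", ["wuntch", "madeline", "madeline wuntch", "deputy chief wuntch"]),
  ("deputy chief wuntch", ["wuntch", "madeline", "madeline wuntch", "deputy chief wuntch"]),
  ("adrian", ["adrian", "pimento", "adrian pimento"]),
  ("pimento", ["adrian", "pimento", "adrian pimento"]),
  ("adrian pimento", ["adrian", "pimento", "adrian pimento"]),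
  ("the vulture", ["the vulture", "vulture", "pembroke", "keith pembroke"]),
  ("vulture", ["the vulture", "vulture", "pembroke", "keith pembroke"]),
  ("pembroke", ["the vulture", "vulture", "pembroke", "keith pembroke"]),
  ("keith pembroke", ["the vulture", "vulture", "pembroke", "keith pembroke"]),
  ("cj", ["cj", "captain cj", "captain c.j. jason stentley", "stentley"]),
  ("captain cj", ["cj", "captain cj", "captain c.j. jason stentley", "stentley"]),
  ("captain c.j. jason stentley", ["cj", "captain cj", "captain c.j. jason stentley", "stentley"]),
  ("stentley", ["cj", "captain cj", "captain c.j. jason stentley", "stentley"]),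
  ("debbie", ["debbie", "fogle", "foggle", "debbie fogle", "debbie foggle", "officer fogle", "officer debbie fogle"]),
  ("fogle", ["debbie", "fogle", "foggle", "debbie fogle", "debbie foggle", "officer fogle", "officer debbie fogle"]),
  ("foggle", ["debbie", "fogle", "foggle", "debbie fogle", "debbie foggle", "officer fogle", "officer debbie fogle"]),
  ("debbie fogle", ["debbie", "fogle", "foggle", "debbie fogle", "debbie foggle", "officer fogle", "officer debbie fogle"]),
  ("debbie foggle", ["debbie", "fogle", "foggle", "debbie fogle", "debbie foggle", "officer fogle", "officer debbie fogle"]),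
  ("officer fogle", ["debbie", "fogle", "foggle", "debbie fogle", "debbie foggle", "officer fogle", "officer debbie fogle"]),
  ("officer debbie fogle", ["debbie", "fogle", "foggle", "debbie fogle", "debbie foggle", "officer fogle", "officer debbie fogle"]),
  ("teddy", ["teddy", "teddy wells"]),
  ("teddy wells", ["teddy", "teddy wells"]),
  ("sophia", ["sophia", "sophia perez"]),
  ("sophia perez", ["sophia", "sophia perez"]),
  ("genevieve", ["genevieve"]),
  ("nikolaj", ["nikolaj", "nikolaj boyle"]),
  ("nikolaj boyle", ["nikolaj", "nikolaj boyle"]),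
  ("dillman", ["dillman"]),
  ("karen", ["karen", "karen peralta"]),
  ("karen peralta", ["karen", "karen peralta"]),
  ("roger", ["roger", "roger peralta"]),
  ("roger peralta", ["roger", "roger peralta"]),
  ("walter", ["walter", "walter peralta"]),
  ("walter peralta", ["walter", "walter peralta"]),
  ("katie", ["katie", "katie peralta"]),
  ("katie peralta", ["katie", "katie peralta"]),
  ("victor", ["victor", "victor santiago"]),
  ("victor santiago", ["victor", "victor santiago"]),
  ("camila", ["camila", "camila santiago"]),
  ("camila santiago", ["camila", "camila santiago"]),
  ("david", ["david", "david santiago"]),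
  ("david santiago", ["david", "david santiago"]),
  ("darlene", ["darlene", "darlene linetti"]),
  ("darlene linetti", ["darlene", "darlene linetti"]),
  ("lynn", ["lynn", "lynn boyle"]),
  ("lynn boyle", ["lynn", "lynn boyle"]),
  ("adam", ["adam", "jarver", "adam jarver"]),
  ("jarver", ["adam", "jarver", "adam jarver"]),
  ("adam jarver", ["adam", "jarver", "adam jarver"]),
  ("beefer", ["beefer"]),
  ("bill", ["bill"]),
  ("cindy", ["cindy", "shatz", "cindy shatz"]),
  ("shatz", ["cindy", "shatz", "cindy shatz"]),
  ("cindy shatz", ["cindy", "shatz", "cindy shatz"]),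
  ("lohank", ["lohank", "detective lohank"]),
  ("detective lohank", ["lohank", "detective lohank"]),
  ("emily", ["emily"]),
  ("gintars", ["gintars"]),
  ("gordon", ["gordon", "lundt", "gordon lundt"]),
  ("lundt", ["gordon", "lundt", "gordon lundt"]),
  ("gordon lundt", ["gordon", "lundt", "gordon lundt"]),
  ("jess", ["jess"]),
  ("keri", ["keri", "brennan", "keri brennan"]),
  ("brennan", ["keri", "brennan", "keri brennan"]),
  ("keri brennan", ["keri", "brennan", "keri brennan"]),
  ("milton", ["milton"]),
  ("pam", ["pam"]),
  ("reynolds", ["reynolds", "sheriff reynolds"]),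
  ("sheriff reynolds", ["reynolds", "sheriff reynolds"])]

def get_speaker_aliases_alt (character : String) : List String :=
  let char_lower := PySem.Str.strip (PySem.Str.lower character)
  match aliasIndex.get? char_lower with
  | some found => PySem.Set.ofList found
  | none =>
      let aliases := PySem.Set.add PySem.Set.empty char_lower
      (PySem.Str.split₀ character).foldl
        (fun s part => if PySem.Str.len part > 2 then PySem.Set.add s (PySem.Str.lower part) else s)
        aliases

-- ===== PRECONDITION & SPEC =====
def Spec_get_speaker_aliases (character : String) (out : List String) : Prop := out = get_speaker_aliases_alt character
instance (character : String) (out : List String) : Decidable (Spec_get_speaker_aliases character out) := by unfold Spec_get_speaker_aliases; infer_instance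

-- ===== CLAIM =====
def Claim_equal_get_speaker_aliases : Prop := ∀ (character : String), Dom_get_speaker_aliases character → Spec_get_speaker_aliases character (get_speaker_aliases character)

-- ===== LEMMAS AND PROOFS =====

-- first matching group's lowered-alias set, as an Option
def firstMatch (s : String) : List (String × List String) → Option (PySem.Set String)
  | [] => none
  | g :: rest =>
      if (g.2.map PySem.Str.lower).contains s || s == PySem.Str.lower g.1 then
        some (PySem.Set.ofList (g.2.map PySem.Str.lower))
      else firstMatch s rest

theorem aScanA_eq_firstMatch (s : String) (gs : List (String × List String)) :
    aScanA s gs = (firstMatch s gs).getD PySem.Set.empty := by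
  induction gs with
  | nil => rfl
  | cons g rest ih =>
      simp only [aScanA, firstMatch]
      split_ifs with h
      · simp [PySem.Set.update_nil_left]
      · exact ih

-- the reverse index that Source B's table was computed from (setdefault: first group wins)
def foldIndex (gs : List (String × List String)) : PySem.Dict String (PySem.Set String) :=
  gs.foldl
    (fun d g =>
      let low := PySem.Set.ofList (g.2.map PySem.Str.lower)
      ((g.2.map PySem.Str.lower) ++ [PySem.Str.lower g.1]).foldl
        (fun d key => d.setdefault key low) d)
    PySem.Dict.empty

set_option maxRecDepth 100000 in
theorem aliasIndex_eq_fold : aliasIndex = foldIndex characterAliases := by decide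

theorem get?_foldl_setdefault (K : List String) (v : PySem.Set String)
    (d : PySem.Dict String (PySem.Set String)) (s : String) :
    (K.foldl (fun d key => d.setdefault key v) d).get? s =
      match d.get? s with
      | some w => some w
      | none => if s ∈ K then some v else none := by
  induction K generalizing d with
  | nil => cases h : d.get? s <;> simp [h]
  | cons k K ih =>
      simp only [List.foldl_cons, ih]
      by_cases hk : s = k
      · subst hk
        rw [PySem.Dict.get?_setdefault_self]
        cases h : d.get? s <;> simp [h]
      · rw [PySem.Dict.get?_setdefault_of_ne d v hk]
        cases h : d.get? s <;> simp [hk]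

theorem get?_index_core (s : String) (gs : List (String × List String))
    (d : PySem.Dict String (PySem.Set String)) :
    (gs.foldl
      (fun d g =>
        let low := PySem.Set.ofList (g.2.map PySem.Str.lower)
        ((g.2.map PySem.Str.lower) ++ [PySem.Str.lower g.1]).foldl
          (fun d key => d.setdefault key low) d) d).get? s =
      match d.get? s with
      | some w => some w
      | none => firstMatch s gs := by
  induction gs generalizing d with
  | nil => simp only [firstMatch]; cases h : d.get? s <;> simp [h]
  | cons g rest ih =>
      simp only [List.foldl_cons, ih, get?_foldl_setdefault]
      have hcond : (((g.2.map PySem.Str.lower).contains s || s == PySem.Str.lower g.1) = true) ↔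
          s ∈ (g.2.map PySem.Str.lower) ++ [PySem.Str.lower g.1] := by
        simp [List.mem_append]
      cases h : d.get? s with
      | some w => simp [h]
      | none =>
          simp only [firstMatch]
          by_cases hm : s ∈ (g.2.map PySem.Str.lower) ++ [PySem.Str.lower g.1]
          · rw [if_pos hm, if_pos (hcond.mpr hm)]
          · rw [if_neg hm, if_neg (fun hx => hm (hcond.mp hx))]

theorem get?_aliasIndex (s : String) : aliasIndex.get? s = firstMatch s characterAliases := by
  rw [aliasIndex_eq_fold, foldIndex, get?_index_core]
  rfl

theorem firstMatch_shape (s : String) (gs : List (String × List String)) (v : PySem.Set String)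
    (h : firstMatch s gs = some v) : ∃ g ∈ gs, v = PySem.Set.ofList (g.2.map PySem.Str.lower) := by
  induction gs with
  | nil => simp [firstMatch] at h
  | cons g rest ih =>
      simp only [firstMatch] at h
      split_ifs at h with hc
      · exact ⟨g, by simp, (Option.some.inj h).symm⟩
      · obtain ⟨g', hg', hv⟩ := ih h
        exact ⟨g', by simp [hg'], hv⟩

-- ===== VERDICT =====
theorem get_speaker_aliases_spec : Claim_equal_get_speaker_aliases := by
  intro character _
  unfold Spec_get_speaker_aliases get_speaker_aliases get_speaker_aliases_alt
  simp only [aScanA_eq_firstMatch, get?_aliasIndex]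
  cases h : firstMatch (PySem.Str.strip (PySem.Str.lower character)) characterAliases with
  | none => simp
  | some v =>
      obtain ⟨g, hg, hv⟩ := firstMatch_shape _ _ _ h
      have hall : ∀ g ∈ characterAliases, g.2 ≠ [] := by decide
      have hne : g.2 ≠ [] := hall g hg
      obtain ⟨x, xs, g2⟩ : ∃ x xs, g.2 = x :: xs := by
        cases h2 : g.2 with
        | nil => exact absurd h2 hne
        | cons x xs => exact ⟨x, xs, rfl⟩
      have hnonempty : v ≠ [] := by
        intro hcon
        have hx : PySem.Str.lower x ∈ v := by
          rw [hv, PySem.Set.mem_ofList]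
          simp [g2]
        rw [hcon] at hx
        simp at hx
      have hnodup : v.Nodup := by
        rw [hv]; exact PySem.Set.nodup_ofList _
      have hE : v.isEmpty = false := by
        cases v with
        | nil => exact absurd rfl hnonempty
        | cons a t => rfl
      simp only [Option.getD_some, hE, Bool.false_eq_true, if_false]
      exact (PySem.Set.ofList_eq_self_of_nodup v hnodup).symm
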